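-- pv_equiv track=rewrite | github.com/june0216/study_algorithm_py | codingTest/dictionary.py | solution
-- ===== SOURCE A (Python) =====
-- from collections import Counter
--
-- def solution(cars, k):
--     # 각 차량의 개수를 카운트
--     car_dic = Counter(cars)
--
--     # 값이 큰 것부터 정렬하고, 값이 같다면 키를 알파벳 순으로 정렬
--     sorted_car = sorted(car_dic.items(), key=lambda x: (x[1], x[0]), reverse=True)
--
--     fail_car = []
--     fail_sum = 0
--     success_sum = 0
--
--     # 상위 k-1개의 차량 개수를 더함
--     for key, v in sorted_car[:k-1]:
--         success_sum += v
--
--     # 나머지 차량을 실패 목록에 추가하고 개수를 더함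
--
--     for key, value in sorted_car[k-1:]:
--         fail_car.append(key)
--         fail_sum += value
--
--     # 실패 차량의 개수가 성공 차량의 개수보다 클 때까지 차량을 제거
--     while fail_sum > success_sum:
--         removed = fail_car.pop()
--         fail_sum -= car_dic[removed]
--
--     return fail_car[-1] if fail_car else None  # fail_car가 비어있지 않다면 마지막 원소 반환, 비어있다면 None 반환
-- ===== SOURCE B (Python) =====
-- from collections import Counter
--
-- def solution(cars, k):
--     cnt = Counter(cars)
--     sorted_car = sorted(cnt.items(), key=lambda x: (x[1], x[0]), reverse=True)
--     success_sum = sum(v for _, v in sorted_car[:k-1])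
--     # single forward pass over the fail region: remember the key at the last
--     # position whose cumulative count still fits within success_sum
--     run = 0
--     best = None
--     for key, v in sorted_car[k-1:]:
--         run += v
--         if run <= success_sum:
--             best = key
--     return best
-- ===== Notes on version B (the rewrite author's own statement) =====
-- stated objective: simpler
-- what changed: A builds a fail_car list then destructively pops from its tail in a while-loop (re-looking each popped key up in the Counter) until the fail sum fits; B does one forward pass over the fail region, accumulating a running sum and remembering the key at the last position whose cumulative count stays within success_sum, building no list and mutating nothing.
import Mathlib
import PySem

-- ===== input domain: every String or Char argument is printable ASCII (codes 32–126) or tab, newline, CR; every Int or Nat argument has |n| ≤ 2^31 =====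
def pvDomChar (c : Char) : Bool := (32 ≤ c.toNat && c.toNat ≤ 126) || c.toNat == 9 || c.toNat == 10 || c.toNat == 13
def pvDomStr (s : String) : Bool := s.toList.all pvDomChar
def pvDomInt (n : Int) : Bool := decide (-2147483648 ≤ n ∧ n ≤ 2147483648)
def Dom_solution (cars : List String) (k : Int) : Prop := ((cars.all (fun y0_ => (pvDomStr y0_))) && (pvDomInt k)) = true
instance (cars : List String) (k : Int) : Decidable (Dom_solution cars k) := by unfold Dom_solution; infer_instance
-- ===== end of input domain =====

-- B replaces A's mutating tail-pop while-loop over fail_car by a single forward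
-- pass over the fail region that remembers the key at the last position whose
-- cumulative count stays within success_sum (objective: simpler, one pass, no list building).

-- ===== PORT A =====
-- the 'while fail_sum > success_sum: removed = fail_car.pop(); fail_sum -= car_dic[removed]' loop
-- (fail_car.pop() on an empty list would raise in Python; that state is unreachable since
--  fail_sum = 0 ≤ success_sum there, so the [] branch returns the list unchanged)
def solutionTrim (carDic : PySem.Dict String Int) (failCar : List String)
    (failSum successSum : Int) : List String :=
  if failSum > successSum then
    match _h : failCar.getLast? with
    | none => failCar
    | some removed =>
      solutionTrim carDic failCar.dropLast (failSum - carDic.getD removed 0) successSum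
  else failCar
termination_by failCar.length
decreasing_by
  have hne : failCar ≠ [] := by
    intro hnil; rw [hnil] at _h; simp at _h
  have := List.length_pos_iff.mpr hne
  simp [List.length_dropLast]; omega

def solution (cars : List String) (k : Int) : Option String :=
  let carDic := PySem.Dict.counter cars
  let sortedCar := PySem.List.sorted2 carDic.items (fun x => x.2) (fun x => x.1) true
  let successSum := (PySem.List.slice sortedCar none (some (k - 1))).foldl
    (fun s p => s + p.2) 0
  let st := (PySem.List.slice sortedCar (some (k - 1)) none).foldl
    (fun (st : List String × Int) p => (st.1 ++ [p.1], st.2 + p.2)) ([], 0)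
  (solutionTrim carDic st.1 st.2 successSum).getLast?

-- ===== PORT B =====
def solution_alt (cars : List String) (k : Int) : Option String :=
  let cnt := PySem.Dict.counter cars
  let sortedCar := PySem.List.sorted2 cnt.items (fun x => x.2) (fun x => x.1) true
  let successSum := ((PySem.List.slice sortedCar none (some (k - 1))).map (fun p => p.2)).sum
  let st := (PySem.List.slice sortedCar (some (k - 1)) none).foldl
    (fun (st : Int × Option String) p =>
      let run := st.1 + p.2
      (run, if run ≤ successSum then some p.1 else st.2)) (0, none)
  st.2

-- ===== PRECONDITION & SPEC =====
def Spec_solution (cars : List String) (k : Int) (out : Option String) : Prop := out = solution_alt cars k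
instance (cars : List String) (k : Int) (out : Option String) : Decidable (Spec_solution cars k out) := by unfold Spec_solution; infer_instance

-- ===== CLAIM (what is proved, stated in full; the proofs are below) =====
def Claim_equal_solution : Prop := ∀ (cars : List String) (k : Int), Dom_solution cars k → Spec_solution cars k (solution cars k)

-- ===== LEMMAS AND PROOFS =====

-- one unfolding of the while-loop when it pops: the popped element is the last one
lemma solutionTrim_pop (d : PySem.Dict String Int) (fc : List String) (r : String)
    (h : fc.getLast? = some r) (fsum ssum : Int) (hgt : fsum > ssum) :
    solutionTrim d fc fsum ssum
      = solutionTrim d fc.dropLast (fsum - d.getD r 0) ssum := by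
  rw [solutionTrim, if_pos hgt]
  split
  · simp_all
  · rename_i r' h'
    rw [h] at h'
    cases h'
    rfl

-- the first component of B's scan accumulates the plain sum of the counts
lemma scan_fst (s : Int) (ps : List (String × Int)) (r0 : Int) (b0 : Option String) :
    (ps.foldl (fun (st : Int × Option String) p =>
      let run := st.1 + p.2
      (run, if run ≤ s then some p.1 else st.2)) (r0, b0)).1
      = r0 + (ps.map (fun p => p.2)).sum := by
  induction ps generalizing r0 b0 with
  | nil => simp
  | cons p t ih => simp [ih]; ring

-- core: A's tail-pop trimming loop keeps exactly the prefix whose last in-bound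
-- position B's forward scan remembers
lemma trim_eq_scan (d : PySem.Dict String Int) (s : Int) (ps : List (String × Int))
    (H : ∀ p ∈ ps, d.getD p.1 0 = p.2) :
    (solutionTrim d (ps.map Prod.fst) ((ps.map (fun p => p.2)).sum) s).getLast?
      = (ps.foldl (fun (st : Int × Option String) p =>
          let run := st.1 + p.2
          (run, if run ≤ s then some p.1 else st.2)) (0, none)).2 := by
  induction ps using List.reverseRecOn with
  | nil =>
    unfold solutionTrim
    simp
  | append_singleton t p ih =>
    have hfold := scan_fst s t 0 none
    rw [List.foldl_append]
    set st := t.foldl (fun (st : Int × Option String) p =>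
      let run := st.1 + p.2
      (run, if run ≤ s then some p.1 else st.2)) ((0 : Int), (none : Option String)) with hst
    have hrun : st.1 + p.2 = (t.map (fun p => p.2)).sum + p.2 := by
      rw [hfold] at *; omega
    by_cases hle : (t.map (fun p => p.2)).sum + p.2 ≤ s
    · -- within bound: the while-loop does nothing, the scan records p.1
      unfold solutionTrim
      have hsum : ((t ++ [p]).map (fun p => p.2)).sum = (t.map (fun p => p.2)).sum + p.2 := by
        simp
      rw [hsum, if_neg (by omega)]
      simp [List.foldl, hrun, hle]
    · -- over bound: the while-loop pops p, the scan keeps its previous best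
      have hsum : ((t ++ [p]).map (fun p => p.2)).sum = (t.map (fun p => p.2)).sum + p.2 := by
        simp
      have hlast : ((t ++ [p]).map Prod.fst).getLast? = some p.1 := by
        simp
      have hgd : d.getD p.1 0 = p.2 := H p (by simp)
      rw [hsum, solutionTrim_pop d _ p.1 hlast _ s (by omega)]
      have hdrop : ((t ++ [p]).map Prod.fst).dropLast = t.map Prod.fst := by
        simp
      rw [hdrop, hgd]
      have : (t.map (fun p => p.2)).sum + p.2 - p.2 = (t.map (fun p => p.2)).sum := by ring
      rw [this, ih (fun q hq => H q (by simp [hq]))]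
      simp [List.foldl, hrun, hle]

-- every pair in the (sliced, sorted) items list is a genuine (key, count) entry of the counter
lemma slice_pairs_sound (cars : List String) (k : Int) (p : String × Int)
    (hp : p ∈ PySem.List.slice
        (PySem.List.sorted2 (PySem.Dict.counter cars).items (fun x => x.2) (fun x => x.1) true)
        (some (k - 1)) none) :
    (PySem.Dict.counter cars).getD p.1 0 = p.2 := by
  have h1 : p ∈ PySem.List.sorted2 (PySem.Dict.counter cars).items
      (fun x => x.2) (fun x => x.1) true := PySem.List.mem_of_mem_slice _ _ _ hp
  have h2 : p ∈ (PySem.Dict.counter cars).items :=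
    (PySem.List.sorted2_perm _ _ _ _).mem_iff.mp h1
  obtain ⟨a, b⟩ := p
  exact PySem.Dict.getD_of_mem_items _ h2 (PySem.Dict.nodup_keys_counter cars) 0

-- ===== VERDICT (by name: the statement is the Claim_ definition above) =====
theorem solution_spec : Claim_equal_solution := by
  intro cars k _
  unfold Spec_solution solution solution_alt
  simp only []
  set d := PySem.Dict.counter cars with hd
  set sc := PySem.List.sorted2 d.items (fun x => x.2) (fun x => x.1) true with hsc
  set fl := PySem.List.slice sc (some (k - 1)) none with hfl
  -- the two success sums agree (fold-with-+ vs map-then-sum)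
  rw [PySem.List.foldl_add]
  simp only [zero_add]
  set s := ((PySem.List.slice sc none (some (k - 1))).map (fun p => p.2)).sum with hs
  -- A's one loop building (fail_car, fail_sum) is the pair of a map and a sum
  have hpair : fl.foldl (fun (st : List String × Int) p => (st.1 ++ [p.1], st.2 + p.2))
      (([] : List String), (0 : Int))
      = (fl.map Prod.fst, (fl.map (fun p => p.2)).sum) := by
    have h := PySem.List.foldl_prod_mk (fun (l : List String) (e : String × Int) => l ++ [e.1])
      (fun (s : Int) (e : String × Int) => s + e.2) fl [] 0
    rw [PySem.List.foldl_append_singleton_eq_map, PySem.List.foldl_add] at h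
    simpa using h
  rw [hpair]
  exact trim_eq_scan d s fl (fun p hp => slice_pairs_sound cars k p (hfl ▸ hp))
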